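-- pv_equiv track=rewrite | github.com/p0ss/MenaceAssetPacker | tools/diff_schemas.py | diff_structs
-- ===== SOURCE A (Python) =====
-- def diff_structs(old_structs, new_structs):
--     """Compare struct definitions."""
--     results = []
--     old_names = set(old_structs.keys())
--     new_names = set(new_structs.keys())
--
--     added = new_names - old_names
--     removed = old_names - new_names
--
--     if added:
--         results.append(("ADD", f"{len(added)} new structs"))
--         for name in sorted(added):
--             results.append(("INFO", f"  + {name}"))
--
--     if removed:
--         results.append(("DEL", f"{len(removed)} removed structs"))
--         for name in sorted(removed):
--             results.append(("INFO", f"  - {name}"))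
--
--     for name in sorted(old_names & new_names):
--         old_s = old_structs[name]
--         new_s = new_structs[name]
--         if old_s.get("size_bytes") != new_s.get("size_bytes"):
--             results.append(("CRIT",
--                            f"{name}: size changed {old_s.get('size_bytes')} -> {new_s.get('size_bytes')}"))
--
--     return results
-- ===== SOURCE B (Python) =====
-- def diff_structs(old_structs, new_structs):
--     """Compare struct definitions (single pass over the sorted union of names)."""
--     added, removed, changed = [], [], []
--     for name in sorted(set(old_structs) | set(new_structs)):
--         if name not in old_structs:
--             added.append(("INFO", f"  + {name}"))
--         elif name not in new_structs:
--             removed.append(("INFO", f"  - {name}"))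
--         else:
--             o = old_structs[name].get("size_bytes")
--             n = new_structs[name].get("size_bytes")
--             if o != n:
--                 changed.append(("CRIT", f"{name}: size changed {o} -> {n}"))
--     results = []
--     if added:
--         results.append(("ADD", f"{len(added)} new structs"))
--         results.extend(added)
--     if removed:
--         results.append(("DEL", f"{len(removed)} removed structs"))
--         results.extend(removed)
--     results.extend(changed)
--     return results
-- ===== Notes on version B (the rewrite author's own statement) =====
-- stated objective: alternative
-- what changed: Replaces A's three set-difference/intersection passes (each followed by its own sort) by a single pass over the sorted union of names that classifies each name into added/removed/size-changed buckets, emitted afterwards in A's exact order.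
import Mathlib
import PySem

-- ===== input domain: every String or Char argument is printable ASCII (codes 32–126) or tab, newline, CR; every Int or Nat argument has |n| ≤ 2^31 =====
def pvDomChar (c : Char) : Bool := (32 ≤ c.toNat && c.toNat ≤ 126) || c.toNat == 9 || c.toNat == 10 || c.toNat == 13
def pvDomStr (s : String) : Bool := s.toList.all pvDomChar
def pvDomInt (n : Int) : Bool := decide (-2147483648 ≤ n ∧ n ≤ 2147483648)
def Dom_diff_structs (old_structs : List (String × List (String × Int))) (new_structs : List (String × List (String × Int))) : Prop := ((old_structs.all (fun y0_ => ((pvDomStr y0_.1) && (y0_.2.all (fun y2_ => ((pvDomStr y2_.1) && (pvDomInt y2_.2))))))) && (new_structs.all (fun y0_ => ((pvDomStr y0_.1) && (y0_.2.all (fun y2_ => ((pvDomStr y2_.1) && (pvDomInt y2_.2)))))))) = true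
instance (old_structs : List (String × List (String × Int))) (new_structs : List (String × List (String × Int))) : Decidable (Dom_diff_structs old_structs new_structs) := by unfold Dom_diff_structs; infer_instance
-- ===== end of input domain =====

-- B replaces A's three set-difference/intersection passes (each with its own sort) by one
-- pass over the sorted union of names into three buckets; same output, similar cost.

-- rendering of f"{x}" for x : Option Int (Python prints None as "None")
def optStr (o : Option Int) : String :=
  match o with
  | none => "None"
  | some n => PySem.Int.toStr n

-- ===== PORT A =====
def diff_structs (old_structs : List (String × List (String × Int))) (new_structs : List (String × List (String × Int))) : List (String × String) :=
  let oldD := PySem.Dict.ofList old_structs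
  let newD := PySem.Dict.ofList new_structs
  let old_names : PySem.Set String := PySem.Set.ofList oldD.keys
  let new_names : PySem.Set String := PySem.Set.ofList newD.keys
  let added := PySem.Set.diff new_names old_names
  let removed := PySem.Set.diff old_names new_names
  let results : List (String × String) :=
    if added.isEmpty then [] else
      ("ADD", PySem.Int.toStr (added.length : Int) ++ " new structs") ::
        (PySem.List.sorted added (fun x => x) false).map (fun name => ("INFO", "  + " ++ name))
  let results := results ++
    (if removed.isEmpty then [] else
      ("DEL", PySem.Int.toStr (removed.length : Int) ++ " removed structs") ::
        (PySem.List.sorted removed (fun x => x) false).map (fun name => ("INFO", "  - " ++ name)))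
  (PySem.List.sorted (PySem.Set.inter old_names new_names) (fun x => x) false).foldl
    (fun results name =>
      let old_s := PySem.Dict.ofList (oldD.getD name [])
      let new_s := PySem.Dict.ofList (newD.getD name [])
      if old_s.get? "size_bytes" != new_s.get? "size_bytes" then
        results ++ [("CRIT", name ++ ": size changed " ++ optStr (old_s.get? "size_bytes") ++ " -> " ++ optStr (new_s.get? "size_bytes"))]
      else results)
    results

-- ===== PORT B =====
def diff_structs_alt (old_structs : List (String × List (String × Int))) (new_structs : List (String × List (String × Int))) : List (String × String) :=
  let oldD := PySem.Dict.ofList old_structs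
  let newD := PySem.Dict.ofList new_structs
  let buckets :=
    (PySem.List.sorted (PySem.Set.union (PySem.Set.ofList oldD.keys) (PySem.Set.ofList newD.keys)) (fun x => x) false).foldl
      (fun (acc : List (String × String) × List (String × String) × List (String × String)) name =>
        if !oldD.contains name then
          (acc.1 ++ [("INFO", "  + " ++ name)], acc.2.1, acc.2.2)
        else if !newD.contains name then
          (acc.1, acc.2.1 ++ [("INFO", "  - " ++ name)], acc.2.2)
        else
          let o := (PySem.Dict.ofList (oldD.getD name [])).get? "size_bytes"
          let n := (PySem.Dict.ofList (newD.getD name [])).get? "size_bytes"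
          if o != n then
            (acc.1, acc.2.1, acc.2.2 ++ [("CRIT", name ++ ": size changed " ++ optStr o ++ " -> " ++ optStr n)])
          else acc)
      ([], [], [])
  (if buckets.1.isEmpty then [] else
    ("ADD", PySem.Int.toStr (buckets.1.length : Int) ++ " new structs") :: buckets.1) ++
  ((if buckets.2.1.isEmpty then [] else
    ("DEL", PySem.Int.toStr (buckets.2.1.length : Int) ++ " removed structs") :: buckets.2.1) ++
  buckets.2.2)

-- ===== PRECONDITION & SPEC =====
def Spec_diff_structs (old_structs : List (String × List (String × Int))) (new_structs : List (String × List (String × Int))) (out : List (String × String)) : Prop := out = diff_structs_alt old_structs new_structs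
instance (old_structs : List (String × List (String × Int))) (new_structs : List (String × List (String × Int))) (out : List (String × String)) : Decidable (Spec_diff_structs old_structs new_structs out) := by unfold Spec_diff_structs; infer_instance

-- ===== CLAIM (what is proved, stated in full; the proofs are below) =====
def Claim_equal_diff_structs : Prop := ∀ (old_structs : List (String × List (String × Int))) (new_structs : List (String × List (String × Int))), Dom_diff_structs old_structs new_structs → Spec_diff_structs old_structs new_structs (diff_structs old_structs new_structs)

-- ===== LEMMAS AND PROOFS =====

-- a ≤-sorted list without duplicates is <-sorted
theorem pairwise_lt_of_le_nodup {l : List String} (h1 : l.Pairwise (· ≤ ·)) (h2 : l.Nodup) :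
    l.Pairwise (· < ·) :=
  (h1.and h2).imp (fun h => lt_of_le_of_ne h.1 h.2)

-- sorting a subset S of L is filtering the sorted L by any predicate that characterises S
theorem sorted_set_eq_filter_sorted (L S : List String) (pb : String → Bool)
    (hL : L.Nodup) (hS : S.Nodup) (hmem : ∀ x, x ∈ S ↔ x ∈ L ∧ pb x = true) :
    PySem.List.sorted S (fun x => x) false = (PySem.List.sorted L (fun x => x) false).filter pb := by
  apply PySem.List.sorted_eq_of_perm_of_pairwise_lt
  · have hsn : (PySem.List.sorted L (fun x => x) false).Nodup :=
      (PySem.List.sorted_perm L (fun x => x) false).symm.nodup hL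
    rw [List.perm_ext_iff_of_nodup (List.Nodup.filter pb hsn) hS]
    intro x
    simp only [List.mem_filter, PySem.List.mem_sorted]
    exact (hmem x).symm
  · exact pairwise_lt_of_le_nodup
      (List.Pairwise.sublist (List.filter_sublist) (PySem.List.sorted_pairwise L (fun x => x)))
      (List.Nodup.filter pb ((PySem.List.sorted_perm L (fun x => x) false).symm.nodup hL))

-- a three-bucket classifying fold is three filters
theorem triple_fold {α β : Type} (p q r : α → Bool) (f g h : α → β) (l : List α)
    (a b c : List β) :
    l.foldl (fun acc x =>
      if p x then (acc.1 ++ [f x], acc.2.1, acc.2.2)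
      else if q x then (acc.1, acc.2.1 ++ [g x], acc.2.2)
      else if r x then (acc.1, acc.2.1, acc.2.2 ++ [h x])
      else acc) (a, b, c)
    = (a ++ (l.filter p).map f,
       b ++ (l.filter (fun x => !p x && q x)).map g,
       c ++ (l.filter (fun x => !p x && !q x && r x)).map h) := by
  induction l generalizing a b c with
  | nil => simp
  | cons x t ih =>
    cases hp : p x
    · cases hq : q x
      · cases hr : r x
        · simp [hp, hq, hr, ih]
        · simp [hp, hq, hr, ih]
      · simp [hp, hq, ih]
    · simp [hp, ih]

theorem map_sorted_isEmpty {α κ β : Type} [LT κ] [DecidableLT κ] (xs : List α) (key : α → κ)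
    (rev : Bool) (f : α → β) :
    ((PySem.List.sorted xs key rev).map f).isEmpty = xs.isEmpty := by
  rw [Bool.eq_iff_iff]
  simp only [List.isEmpty_iff, List.map_eq_nil_iff, PySem.List.sorted_eq_nil_iff]

theorem map_sorted_length {α κ β : Type} [LT κ] [DecidableLT κ] (xs : List α) (key : α → κ)
    (rev : Bool) (f : α → β) :
    ((PySem.List.sorted xs key rev).map f).length = xs.length := by
  rw [List.length_map, PySem.List.length_sorted]

-- the core equality, stated over the two key dictionaries
theorem diff_core (dO dN : PySem.Dict String (List (String × Int))) :
    (let old_names : PySem.Set String := PySem.Set.ofList dO.keys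
     let new_names : PySem.Set String := PySem.Set.ofList dN.keys
     let added := PySem.Set.diff new_names old_names
     let removed := PySem.Set.diff old_names new_names
     let results : List (String × String) :=
       if added.isEmpty then [] else
         ("ADD", PySem.Int.toStr (added.length : Int) ++ " new structs") ::
           (PySem.List.sorted added (fun x => x) false).map (fun name => ("INFO", "  + " ++ name))
     let results := results ++
       (if removed.isEmpty then [] else
         ("DEL", PySem.Int.toStr (removed.length : Int) ++ " removed structs") ::
           (PySem.List.sorted removed (fun x => x) false).map (fun name => ("INFO", "  - " ++ name)))
     (PySem.List.sorted (PySem.Set.inter old_names new_names) (fun x => x) false).foldl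
       (fun results name =>
         if (PySem.Dict.ofList (dO.getD name [])).get? "size_bytes" != (PySem.Dict.ofList (dN.getD name [])).get? "size_bytes" then
           results ++ [("CRIT", name ++ ": size changed " ++ optStr ((PySem.Dict.ofList (dO.getD name [])).get? "size_bytes") ++ " -> " ++ optStr ((PySem.Dict.ofList (dN.getD name [])).get? "size_bytes"))]
         else results)
       results)
    =
    (let buckets :=
       (PySem.List.sorted (PySem.Set.union (PySem.Set.ofList dO.keys) (PySem.Set.ofList dN.keys)) (fun x => x) false).foldl
         (fun (acc : List (String × String) × List (String × String) × List (String × String)) name =>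
           if !dO.contains name then
             (acc.1 ++ [("INFO", "  + " ++ name)], acc.2.1, acc.2.2)
           else if !dN.contains name then
             (acc.1, acc.2.1 ++ [("INFO", "  - " ++ name)], acc.2.2)
           else if (PySem.Dict.ofList (dO.getD name [])).get? "size_bytes" != (PySem.Dict.ofList (dN.getD name [])).get? "size_bytes" then
             (acc.1, acc.2.1, acc.2.2 ++ [("CRIT", name ++ ": size changed " ++ optStr ((PySem.Dict.ofList (dO.getD name [])).get? "size_bytes") ++ " -> " ++ optStr ((PySem.Dict.ofList (dN.getD name [])).get? "size_bytes"))])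
           else acc)
         ([], [], [])
     (if buckets.1.isEmpty then [] else
       ("ADD", PySem.Int.toStr (buckets.1.length : Int) ++ " new structs") :: buckets.1) ++
     ((if buckets.2.1.isEmpty then [] else
       ("DEL", PySem.Int.toStr (buckets.2.1.length : Int) ++ " removed structs") :: buckets.2.1) ++
     buckets.2.2)) := by
  have hUn : (PySem.Set.union (PySem.Set.ofList dO.keys) (PySem.Set.ofList dN.keys)).Nodup :=
    PySem.Set.nodup_union _ _ (PySem.Set.nodup_ofList _)
  have hadd : PySem.List.sorted (PySem.Set.diff (PySem.Set.ofList dN.keys) (PySem.Set.ofList dO.keys)) (fun x => x) false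
      = (PySem.List.sorted (PySem.Set.union (PySem.Set.ofList dO.keys) (PySem.Set.ofList dN.keys)) (fun x => x) false).filter
          (fun x => !dO.contains x) := by
    apply sorted_set_eq_filter_sorted _ _ _ hUn (PySem.Set.nodup_diff _ _ (PySem.Set.nodup_ofList _))
    intro x
    simp only [PySem.Set.mem_diff, PySem.Set.mem_union, PySem.Set.mem_ofList,
      ← PySem.Dict.contains_iff_mem_keys]
    cases dO.contains x <;> cases dN.contains x <;> simp
  have hrem : PySem.List.sorted (PySem.Set.diff (PySem.Set.ofList dO.keys) (PySem.Set.ofList dN.keys)) (fun x => x) false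
      = (PySem.List.sorted (PySem.Set.union (PySem.Set.ofList dO.keys) (PySem.Set.ofList dN.keys)) (fun x => x) false).filter
          (fun x => dO.contains x && !dN.contains x) := by
    apply sorted_set_eq_filter_sorted _ _ _ hUn (PySem.Set.nodup_diff _ _ (PySem.Set.nodup_ofList _))
    intro x
    simp only [PySem.Set.mem_diff, PySem.Set.mem_union, PySem.Set.mem_ofList,
      ← PySem.Dict.contains_iff_mem_keys]
    cases dO.contains x <;> cases dN.contains x <;> simp
  have hboth : PySem.List.sorted (PySem.Set.inter (PySem.Set.ofList dO.keys) (PySem.Set.ofList dN.keys)) (fun x => x) false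
      = (PySem.List.sorted (PySem.Set.union (PySem.Set.ofList dO.keys) (PySem.Set.ofList dN.keys)) (fun x => x) false).filter
          (fun x => dO.contains x && dN.contains x) := by
    apply sorted_set_eq_filter_sorted _ _ _ hUn (PySem.Set.nodup_inter _ _ (PySem.Set.nodup_ofList _))
    intro x
    simp only [PySem.Set.mem_inter, PySem.Set.mem_union, PySem.Set.mem_ofList,
      ← PySem.Dict.contains_iff_mem_keys]
    cases dO.contains x <;> cases dN.contains x <;> simp
  simp only []
  rw [triple_fold
    (fun name => !dO.contains name) (fun name => !dN.contains name)
    (fun name => (PySem.Dict.ofList (dO.getD name [])).get? "size_bytes" != (PySem.Dict.ofList (dN.getD name [])).get? "size_bytes")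
    (fun name => (("INFO", "  + " ++ name) : String × String))
    (fun name => (("INFO", "  - " ++ name) : String × String))
    (fun name => (("CRIT", name ++ ": size changed " ++ optStr ((PySem.Dict.ofList (dO.getD name [])).get? "size_bytes") ++ " -> " ++ optStr ((PySem.Dict.ofList (dN.getD name [])).get? "size_bytes")) : String × String))]
  simp only [List.nil_append, Bool.not_not]
  rw [PySem.List.foldl_append_if
    (p := fun name => (PySem.Dict.ofList (dO.getD name [])).get? "size_bytes" != (PySem.Dict.ofList (dN.getD name [])).get? "size_bytes")
    (f := fun name => (("CRIT", name ++ ": size changed " ++ optStr ((PySem.Dict.ofList (dO.getD name [])).get? "size_bytes") ++ " -> " ++ optStr ((PySem.Dict.ofList (dN.getD name [])).get? "size_bytes")) : String × String))]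
  have h3 : ((PySem.List.sorted (PySem.Set.union (PySem.Set.ofList dO.keys) (PySem.Set.ofList dN.keys)) (fun x => x) false).filter
        (fun x => (dO.contains x && dN.contains x) && ((PySem.Dict.ofList (dO.getD x [])).get? "size_bytes" != (PySem.Dict.ofList (dN.getD x [])).get? "size_bytes")))
      = ((PySem.List.sorted (PySem.Set.inter (PySem.Set.ofList dO.keys) (PySem.Set.ofList dN.keys)) (fun x => x) false).filter
          (fun x => (PySem.Dict.ofList (dO.getD x [])).get? "size_bytes" != (PySem.Dict.ofList (dN.getD x [])).get? "size_bytes")) := by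
    rw [hboth, List.filter_filter]
    exact List.filter_congr (fun x _ => by
      cases dO.contains x <;> cases dN.contains x <;> simp)
  rw [← hadd, ← hrem, h3, map_sorted_isEmpty, map_sorted_isEmpty, map_sorted_length,
    map_sorted_length, List.append_assoc]

-- ===== VERDICT (by name: the statement is the Claim_ definition above) =====
theorem diff_structs_spec : Claim_equal_diff_structs := by
  intro old_structs new_structs _
  show diff_structs old_structs new_structs = diff_structs_alt old_structs new_structs
  exact diff_core (PySem.Dict.ofList old_structs) (PySem.Dict.ofList new_structs)
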